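-- pv_equiv track=rewrite | github.com/0101/focused-review | skills/focused-review/scripts/focused-review.py | _split_yaml_list
-- ===== SOURCE A (Python) =====
-- def _split_yaml_list(s: str) -> list[str]:
--     """Split a YAML inline list body on commas, respecting ``{}`` brace groups.
--
--     ``"opus, codex"``         → ``["opus", "codex"]``
--     ``"**/*.{cs,fs}, !Tests"`` → ``["**/*.{cs,fs}", "!Tests"]``
--     """
--     parts: list[str] = []
--     depth = 0
--     start = 0
--     for i, ch in enumerate(s):
--         if ch == "{":
--             depth += 1
--         elif ch == "}":
--             depth = max(depth - 1, 0)
--         elif ch == "," and depth == 0: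
--             parts.append(s[start:i])
--             start = i + 1
--     parts.append(s[start:])
--     return parts
-- ===== SOURCE B (Python) =====
-- def _split_yaml_list(s: str) -> list[str]:
--     """Split on top-level commas: cut at every comma first, then merge back
--     the pieces that fall inside an open ``{`` group."""
--     pieces = s.split(",")
--     parts: list[str] = []
--     buf = ""
--     depth = 0
--     for piece in pieces[:-1]:
--         buf += piece
--         for ch in piece:
--             if ch == "{":
--                 depth += 1
--             elif ch == "}":
--                 depth = max(depth - 1, 0)
--         if depth == 0:
--             parts.append(buf)
--             buf = ""
--         else:
--             buf += ","
--     parts.append(buf + pieces[-1])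
--     return parts
-- ===== Notes on version B (the rewrite author's own statement) =====
-- stated objective: faster
-- what changed: A does one indexed Python-level character scan keeping a start pointer and slicing at each top-level comma; B instead breaks the string with the C-level str.split on commas and then folds over the fragments, rejoining brace-protected fragments with a comma while a running clamped brace-depth counter is nonzero.
import Mathlib
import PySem

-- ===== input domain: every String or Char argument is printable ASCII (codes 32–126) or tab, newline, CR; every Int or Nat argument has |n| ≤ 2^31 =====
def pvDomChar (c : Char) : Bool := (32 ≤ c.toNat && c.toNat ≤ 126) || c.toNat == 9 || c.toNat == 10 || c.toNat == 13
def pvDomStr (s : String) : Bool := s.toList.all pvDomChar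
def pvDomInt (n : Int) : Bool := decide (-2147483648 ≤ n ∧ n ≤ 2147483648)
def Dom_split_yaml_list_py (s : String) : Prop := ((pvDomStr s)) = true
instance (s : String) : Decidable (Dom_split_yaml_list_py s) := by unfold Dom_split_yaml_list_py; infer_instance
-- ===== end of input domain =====

-- B re-splits: a naive split on every comma followed by a depth-driven merge of the
-- pieces, instead of A's single indexed scan with slice bookkeeping (objective: alternative).

-- ===== PORT A =====
-- loop body of A's `for i, ch in enumerate(s)` (state: parts, depth, start)
def aStep (cs : List Char) (st : List (List Char) × Int × Int) (p : Int × Char) :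
    List (List Char) × Int × Int :=
  match st, p with
  | (parts, depth, start), (i, ch) =>
    if ch = '{' then (parts, depth + 1, start)
    else if ch = '}' then (parts, max (depth - 1) 0, start)
    else if ch = ',' ∧ depth = 0 then
      (parts ++ [PySem.List.slice cs (some start) (some i)], depth, i + 1)
    else (parts, depth, start)

def split_yaml_list_py (s : String) : List String :=
  let cs := s.toList
  let st := (PySem.List.enumerate cs 0).foldl (aStep cs) ([], 0, 0)
  (st.1 ++ [PySem.List.slice cs (some st.2.2) none]).map String.ofList

-- ===== PORT B =====
-- depth update for one character (B's inner `for ch in piece` body)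
def updDepth (d : Int) (ch : Char) : Int :=
  if ch = '{' then d + 1 else if ch = '}' then max (d - 1) 0 else d

-- loop body of B's `for piece in pieces[:-1]` (state: parts, buf, depth)
def bStep (st : List (List Char) × List Char × Int) (piece : List Char) :
    List (List Char) × List Char × Int :=
  match st with
  | (parts, buf, depth) =>
    let buf' := buf ++ piece
    let depth' := piece.foldl updDepth depth
    if depth' = 0 then (parts ++ [buf'], [], depth') else (parts, buf' ++ [','], depth')

def split_yaml_list_py_alt (s : String) : List String :=
  let pieces := PySem.Chars.splitOn s.toList [',']
  let st := (PySem.List.slice pieces none (some (-1))).foldl bStep ([], [], 0)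
  -- pieces[-1]: str.split always returns a non-empty list, so pyGet? is never none here
  (st.1 ++ [st.2.1 ++ (PySem.List.pyGet? pieces (-1)).getD []]).map String.ofList

-- ===== PRECONDITION & SPEC =====
def Spec_split_yaml_list_py (s : String) (out : List String) : Prop := out = split_yaml_list_py_alt s
instance (s : String) (out : List String) : Decidable (Spec_split_yaml_list_py s out) := by unfold Spec_split_yaml_list_py; infer_instance

-- ===== CLAIM (what is proved, stated in full; the proofs are below) =====
def Claim_equal_split_yaml_list_py : Prop := ∀ (s : String), Dom_split_yaml_list_py s → Spec_split_yaml_list_py s (split_yaml_list_py s)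

-- ===== LEMMAS AND PROOFS =====

-- reference splitter: the segments of cs at top-level commas, `cur` the pending prefix
def segs : List Char → Int → List Char → List (List Char)
  | [], _, cur => [cur]
  | c :: cs, d, cur =>
    if c = '{' then segs cs (d + 1) (cur ++ [c])
    else if c = '}' then segs cs (max (d - 1) 0) (cur ++ [c])
    else if c = ',' ∧ d = 0 then cur :: segs cs 0 []
    else segs cs d (cur ++ [c])

-- structural form of Chars.splitOn · [',']
def splitc : List Char → List (List Char)
  | [] => [[]]
  | c :: cs => if c = ',' then [] :: splitc cs else (splitc cs).modifyHead (c :: ·)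

theorem splitc_ne_nil (cs : List Char) : splitc cs ≠ [] := by
  induction cs with
  | nil => simp [splitc]
  | cons c cs ih =>
      simp only [splitc]
      split_ifs
      · simp
      · cases h : splitc cs with
        | nil => exact absurd h ih
        | cons p ps => simp [List.modifyHead]

theorem go_eq (l : List Char) : ∀ (fuel : Nat) (cur : List Char) (acc : List (List Char)),
    l.length ≤ fuel →
    PySem.Chars.splitOn.go [','] fuel l cur acc
      = acc.reverse ++ (splitc l).modifyHead (cur.reverse ++ ·) := by
  induction l with
  | nil =>
      intro fuel cur acc _
      cases fuel <;> simp [PySem.Chars.splitOn.go, splitc, List.modifyHead]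
  | cons c rest ih =>
      intro fuel cur acc hf
      cases fuel with
      | zero => simp at hf
      | succ f =>
          have hf' : rest.length ≤ f := by simpa using hf
          by_cases hc : c = ','
          · subst hc
            have hpre : [','].isPrefixOf (',' :: rest) = true := by
              simp [List.isPrefixOf]
            simp only [PySem.Chars.splitOn.go, hpre, if_pos, List.length_cons,
              List.length_nil, List.drop_succ_cons, List.drop_zero]
            rw [ih f [] (cur.reverse :: acc) hf']
            cases h : splitc rest with
            | nil => exact absurd h (splitc_ne_nil rest)
            | cons p ps => simp [splitc, List.modifyHead, h]
          · have hpre : [','].isPrefixOf (c :: rest) = false := by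
              simp [List.isPrefixOf]
              intro h; exact absurd h.symm hc
            simp only [PySem.Chars.splitOn.go, hpre, Bool.false_eq_true, if_false]
            rw [ih f (c :: cur) acc hf']
            cases h : splitc rest with
            | nil => exact absurd h (splitc_ne_nil rest)
            | cons p ps => simp [splitc, hc, List.modifyHead, h]

theorem splitOn_eq_splitc (cs : List Char) : PySem.Chars.splitOn cs [','] = splitc cs := by
  have h := go_eq cs (cs.length + 1) [] [] (by omega)
  simp only [PySem.Chars.splitOn] at *
  rw [h]
  cases hs : splitc cs with
  | nil => exact absurd hs (splitc_ne_nil cs)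
  | cons p ps => simp [List.modifyHead]

-- A's indexed scan computes `segs`
theorem A_main (cs : List Char) : ∀ (rest : List Char) (n start : Nat)
    (parts : List (List Char)) (d : Int),
    rest = cs.drop n → start ≤ n →
    (let st := (PySem.List.enumerate rest (n : Int)).foldl (aStep cs) (parts, d, ((start : Nat) : Int));
      st.1 ++ [PySem.List.slice cs (some st.2.2) none])
      = parts ++ segs rest d ((cs.drop start).take (n - start)) := by
  intro rest
  induction rest with
  | nil =>
      intro n start parts d hrest hsn
      have hlen : cs.length ≤ n := by
        by_contra hlt
        have hne : cs.drop n ≠ [] := by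
          rw [Ne, List.drop_eq_nil_iff]
          omega
        exact hne hrest.symm
      simp only [PySem.List.enumerate_nil, List.foldl_nil, PySem.List.slice_from_natCast]
      have htake : (List.drop start cs).take (n - start) = List.drop start cs := by
        apply List.take_of_length_le
        simp
        omega
      simp [segs, htake]
  | cons c rest' ih =>
      intro n start parts d hrest hsn
      have hn : n < cs.length := by
        by_contra hlt
        rw [List.drop_eq_nil_of_le (by omega)] at hrest
        exact (List.cons_ne_nil c rest') hrest
      have hgc : cs[n]? = some c := by
        have h0 := congrArg (fun l => l[0]?) hrest
        simpa [List.getElem?_drop] using h0.symm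
      have hrest' : rest' = cs.drop (n + 1) := by
        have h1 := congrArg List.tail hrest
        simpa [List.tail_drop] using h1
      have hcur : ∀ m : Nat, m ≤ n →
          (cs.drop m).take (n + 1 - m) = (cs.drop m).take (n - m) ++ [c] := by
        intro m hm
        have hnm : n + 1 - m = (n - m) + 1 := by omega
        have hgd : (List.drop m cs)[n - m]? = some c := by
          simp only [List.getElem?_drop]
          rw [show m + (n - m) = n by omega]
          exact hgc
        rw [hnm, List.take_add_one, hgd]
        rfl
      have hcast : (n : Int) + 1 = ((n + 1 : Nat) : Int) := by push_cast; ring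
      simp only [PySem.List.enumerate_cons, List.foldl_cons]
      by_cases hc1 : c = '{'
      · simp only [aStep, if_pos hc1]
        rw [hcast, ih (n + 1) start parts (d + 1) hrest' (by omega)]
        rw [hcur start hsn]
        simp [segs, hc1]
      · by_cases hc2 : c = '}'
        · simp only [aStep, if_neg hc1, if_pos hc2]
          rw [hcast, ih (n + 1) start parts (max (d - 1) 0) hrest' (by omega)]
          rw [hcur start hsn]
          simp [segs, hc2]
        · by_cases hc3 : c = ',' ∧ d = 0
          · have hslice : PySem.List.slice cs (some ((start : Nat) : Int)) (some ((n : Nat) : Int))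
                = (cs.drop start).take (n - start) := PySem.List.slice_natCast cs start n
            simp only [aStep, if_neg hc1, if_neg hc2, if_pos hc3]
            rw [hcast, ih (n + 1) (n + 1) (parts ++ [PySem.List.slice cs (some ((start : Nat) : Int)) (some ((n : Nat) : Int))]) d hrest' (by omega)]
            rw [hslice]
            obtain ⟨hc, hd⟩ := hc3
            subst hd
            simp [segs, hc]
          · simp only [aStep, if_neg hc1, if_neg hc2, if_neg hc3]
            rw [hcast, ih (n + 1) start parts d hrest' (by omega)]
            rw [hcur start hsn]
            simp [segs, hc1, hc2, hc3]

theorem dropWhile_head_false {α : Type} (p : α → Bool) :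
    ∀ (l : List α) (a : α) (t : List α), l.dropWhile p = a :: t → p a = false := by
  intro l
  induction l with
  | nil => intro a t h; simp [List.dropWhile] at h
  | cons x xs ih =>
      intro a t h
      rw [List.dropWhile_cons] at h
      split_ifs at h with hp
      · exact ih a t h
      · cases h
        simpa using hp

theorem segs_cons_ne_comma (a : Char) (ha : a ≠ ',') (t : List Char) (d : Int)
    (buf : List Char) :
    segs (a :: t) d buf = segs t (updDepth d a) (buf ++ [a]) := by
  by_cases h1 : a = '{'
  · simp [segs, updDepth, h1]
  · by_cases h2 : a = '}'
    · simp [segs, updDepth, h2]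
    · simp [segs, updDepth, h1, h2, ha]

theorem segs_push : ∀ (p : List Char), ',' ∉ p →
    ∀ (cs : List Char) (d : Int) (buf : List Char),
    segs (p ++ cs) d buf = segs cs (p.foldl updDepth d) (buf ++ p) := by
  intro p
  induction p with
  | nil => intro _ cs d buf; simp
  | cons a p ih =>
      intro hp cs d buf
      have ha : a ≠ ',' := fun h => hp (by simp [h])
      have hp' : ',' ∉ p := fun h => hp (by simp [h])
      rw [List.cons_append, segs_cons_ne_comma a ha, ih hp' cs (updDepth d a) (buf ++ [a])]
      simp

theorem splitc_append (p : List Char) (hp : ',' ∉ p) (l : List Char) :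
    splitc (p ++ l) = (splitc l).modifyHead (p ++ ·) := by
  induction p with
  | nil =>
      cases h : splitc l with
      | nil => exact absurd h (splitc_ne_nil l)
      | cons q qs => simp [List.modifyHead, h]
  | cons a p ih =>
      have ha : a ≠ ',' := fun h => hp (by simp [h])
      have hp' : ',' ∉ p := fun h => hp (by simp [h])
      rw [List.cons_append]
      simp only [splitc, if_neg ha, ih hp']
      cases h : splitc l with
      | nil => exact absurd h (splitc_ne_nil l)
      | cons q qs => simp [List.modifyHead]

theorem splitc_no_comma (p : List Char) (hp : ',' ∉ p) : splitc p = [p] := by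
  have h := splitc_append p hp []
  simpa [splitc, List.modifyHead] using h

-- B's split-and-merge computes `segs`
theorem B_main : ∀ (n : Nat) (cs : List Char), cs.length ≤ n →
    ∀ (parts : List (List Char)) (buf : List Char) (d : Int),
    (let ps := splitc cs
     let st := ps.dropLast.foldl bStep (parts, buf, d)
     st.1 ++ [st.2.1 ++ ps.getLastD []])
      = parts ++ segs cs d buf := by
  intro n
  induction n with
  | zero =>
      intro cs hlen parts buf d
      have hcs : cs = [] := List.eq_nil_of_length_eq_zero (Nat.le_zero.mp hlen)
      subst hcs
      simp [splitc, segs]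
  | succ m ih =>
      intro cs hlen parts buf d
      by_cases hmem : ',' ∈ cs
      · -- split at the first comma
        have hdec : cs.dropWhile (fun c => c != ',') ≠ [] := by
          intro h
          rw [List.dropWhile_eq_nil_iff] at h
          have := h ',' hmem
          simp at this
        obtain ⟨c0, rest, hd⟩ := List.exists_cons_of_ne_nil hdec
        have hc0 : c0 = ',' := by
          have := dropWhile_head_false (fun c => c != ',') cs c0 rest hd
          simpa using this
        subst hc0
        set p := cs.takeWhile (fun c => c != ',') with hpdef
        have hpnc : ',' ∉ p := by
          intro h
          have := List.mem_takeWhile_imp h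
          simp at this
        have hcs : cs = p ++ ',' :: rest := by
          rw [hpdef, ← hd, List.takeWhile_append_dropWhile]
        have hrlen : rest.length ≤ m := by
          have := congrArg List.length hcs
          simp at this
          omega
        have hsp : splitc cs = p :: splitc rest := by
          rw [hcs, splitc_append p hpnc, show splitc (',' :: rest) = [] :: splitc rest by
            simp [splitc]]
          simp [List.modifyHead]
        obtain ⟨q, qs, hq⟩ := List.exists_cons_of_ne_nil (splitc_ne_nil rest)
        have hsegs : segs cs d buf
            = if p.foldl updDepth d = 0 then (buf ++ p) :: segs rest 0 []
              else segs rest (p.foldl updDepth d) (buf ++ p ++ [',']) := by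
          rw [hcs, segs_push p hpnc]
          by_cases h0 : p.foldl updDepth d = 0
          · simp [segs, h0]
          · simp [segs, h0]
        simp only [hsp, hq, List.dropLast_cons₂, List.foldl_cons, List.getLastD_cons]
        rw [← hq]
        rw [show qs.getLastD q = (splitc rest).getLastD [] from by
          rw [hq, List.getLastD_cons]]
        simp only [bStep]
        by_cases h0 : p.foldl updDepth d = 0
        · rw [if_pos h0]
          have hih := ih rest hrlen (parts ++ [buf ++ p]) [] 0
          simp only at hih
          rw [← h0] at hih
          rw [hih, hsegs, if_pos h0, h0]
          simp
        · rw [if_neg h0]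
          have hih := ih rest hrlen parts (buf ++ p ++ [',']) (p.foldl updDepth d)
          simp only at hih
          rw [hih, hsegs, if_neg h0]
      · rw [splitc_no_comma cs hmem]
        have h := segs_push cs hmem [] d buf
        simp only [List.append_nil] at h
        rw [h]
        simp [segs]

theorem A_eq (s : String) :
    split_yaml_list_py s = (segs s.toList 0 []).map String.ofList := by
  have h := A_main s.toList s.toList 0 0 [] 0 (by simp) (le_refl 0)
  simp only [Nat.cast_zero, Nat.sub_self, List.take_zero, List.drop_zero,
    List.nil_append] at h
  simp only [split_yaml_list_py]
  rw [h]

theorem B_eq (s : String) :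
    split_yaml_list_py_alt s = (segs s.toList 0 []).map String.ofList := by
  have h := B_main (s.toList.length) s.toList le_rfl [] [] 0
  simp only at h
  simp only [split_yaml_list_py_alt, splitOn_eq_splitc]
  have hne := splitc_ne_nil s.toList
  rw [PySem.List.slice_to_neg_one]
  have hget : (PySem.List.pyGet? (splitc s.toList) (-1)).getD [] = (splitc s.toList).getLastD [] := by
    obtain ⟨q, qs, hq⟩ := List.exists_cons_of_ne_nil hne
    rw [hq]
    simp [PySem.List.pyGet?, PySem.List.pyIdx?, List.getLastD_eq_getLast?,
      List.getLast?_eq_getElem?]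
  rw [hget, h]
  simp

-- ===== VERDICT (by name: the statement is the Claim_ definition above) =====
theorem split_yaml_list_py_spec : Claim_equal_split_yaml_list_py := by
  intro s _
  unfold Spec_split_yaml_list_py
  rw [A_eq, B_eq]
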